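-- pv_equiv track=rewrite | github.com/Bytelope/mcp-discord | src/discord_mcp/watch.py | format_notification
-- ===== SOURCE A (Python) =====
-- def format_notification(messages: list[tuple[str, str]]) -> str:
--     """Render a batch of (channel_name, author_name) into one inject line.
--
--     Authors per channel are deduplicated while preserving first-seen order so
--     that repeat senders within a debounce window collapse to a single mention.
--     """
--     if not messages:
--         return ""
--     by_channel: dict[str, list[str]] = {}
--     for channel, author in messages:
--         by_channel.setdefault(channel, []).append(author)
--     parts = []
--     for channel in sorted(by_channel):
--         seen: set[str] = set()
--         unique = [a for a in by_channel[channel] if not (a in seen or seen.add(a))]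
--         parts.append(f"#{channel}({','.join('@' + a for a in unique)})")
--     total = sum(len(v) for v in by_channel.values())
--     return f"[discord] {total} new: {' '.join(parts)}"
-- ===== SOURCE B (Python) =====
-- def format_notification(messages: list[tuple[str, str]]) -> str:
--     """Render a batch of (channel_name, author_name) into one inject line.
--
--     Different decomposition: instead of grouping into a dict and deduplicating
--     each channel with a seen-set, deduplicate the (channel, author) pairs
--     globally once with dict.fromkeys (first occurrences, in order); then each
--     channel's unique authors are just a direct scan of that deduped list, and
--     the total is simply len(messages).
--     """
--     if not messages:
--         return ""
--     uniq = list(dict.fromkeys(messages))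
--     channels = sorted({c for c, _ in uniq})
--     parts = " ".join(
--         "#{}({})".format(ch, ",".join("@" + a for c, a in uniq if c == ch))
--         for ch in channels
--     )
--     return f"[discord] {len(messages)} new: {parts}"
-- ===== Notes on version B (the rewrite author's own statement) =====
-- stated objective: alternative
-- what changed: A's grouping dict plus per-channel seen-set dedup is replaced by one global first-occurrence dedup of the (channel, author) pairs (dict.fromkeys), after which each channel's author list is a plain scan of the deduped list and the total is len(messages); no grouping structure is built at all.
import Mathlib
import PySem

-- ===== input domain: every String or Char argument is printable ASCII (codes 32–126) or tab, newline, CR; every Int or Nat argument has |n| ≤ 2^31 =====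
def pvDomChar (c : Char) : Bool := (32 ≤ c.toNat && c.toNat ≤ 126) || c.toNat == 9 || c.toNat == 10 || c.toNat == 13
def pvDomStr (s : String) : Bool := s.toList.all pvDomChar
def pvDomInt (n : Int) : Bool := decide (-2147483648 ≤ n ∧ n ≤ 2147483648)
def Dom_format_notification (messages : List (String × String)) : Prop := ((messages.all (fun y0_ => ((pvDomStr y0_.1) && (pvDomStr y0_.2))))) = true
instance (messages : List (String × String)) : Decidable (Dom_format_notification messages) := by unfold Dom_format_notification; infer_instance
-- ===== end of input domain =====

-- B replaces A's grouping dict + per-channel seen-set with one global first-occurrence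
-- dedup of the pairs, per-channel scans of that deduped list, and len(messages) as the total.

-- ===== PORT A =====
-- the '[a for a in … if not (a in seen or seen.add(a))]' comprehension with its mutable 'seen' set
def pvUniqueA : PySem.Set String → List String → List String
  | _, [] => []
  | seen, a :: t =>
      if PySem.Set.contains seen a then pvUniqueA seen t
      else a :: pvUniqueA (PySem.Set.add seen a) t

def format_notification (messages : List (String × String)) : String :=
  if messages = [] then ""
  else
    let by_channel : PySem.Dict String (List String) :=
      messages.foldl (fun d p => d.modify p.1 [] (· ++ [p.2])) PySem.Dict.empty
    let parts : List String :=
      (PySem.List.sorted by_channel.keys (fun x => x) false).foldl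
        (fun acc channel =>
          let unique := pvUniqueA PySem.Set.empty (by_channel.getD channel [])
          acc ++ ["#" ++ channel ++ "(" ++
            PySem.Str.join "," (unique.map (fun a => "@" ++ a)) ++ ")"]) []
    let total : Int := (by_channel.values.map (fun v => (v.length : Int))).sum
    "[discord] " ++ PySem.Int.toStr total ++ " new: " ++ PySem.Str.join " " parts

-- ===== PORT B =====
def format_notification_alt (messages : List (String × String)) : String :=
  if messages = [] then ""
  else
    let uniq : List (String × String) := PySem.List.dedup messages
    let channels : List String :=
      PySem.List.sorted (PySem.Set.ofList (uniq.map (fun p => p.1))) (fun x => x) false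
    let parts : String :=
      PySem.Str.join " "
        (channels.map (fun ch =>
          "#" ++ ch ++ "(" ++
            PySem.Str.join ","
              ((uniq.filter (fun p => p.1 == ch)).map (fun p => "@" ++ p.2)) ++ ")"))
    "[discord] " ++ PySem.Int.toStr (messages.length : Int) ++ " new: " ++ parts

-- ===== PRECONDITION & SPEC =====
def Spec_format_notification (messages : List (String × String)) (out : String) : Prop := out = format_notification_alt messages
instance (messages : List (String × String)) (out : String) : Decidable (Spec_format_notification messages out) := by unfold Spec_format_notification; infer_instance

-- ===== CLAIM (what is proved, stated in full; the proofs are below) =====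
def Claim_equal_format_notification : Prop := ∀ (messages : List (String × String)), Dom_format_notification messages → Spec_format_notification messages (format_notification messages)

-- ===== LEMMAS AND PROOFS =====

-- the seen-set comprehension walks the list appending first occurrences: it extends 'seen' to Set.update
lemma pvUniqueA_update (xs : List String) (seen : PySem.Set String) :
    seen ++ pvUniqueA seen xs = PySem.Set.update seen xs := by
  induction xs generalizing seen with
  | nil => simp [pvUniqueA, PySem.Set.update]
  | cons a t ih =>
      by_cases h : PySem.Set.contains seen a = true
      · have hm : a ∈ seen := by
          simp only [PySem.Set.contains] at h
          exact List.mem_of_elem_eq_true h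
        have hadd : PySem.Set.add seen a = seen := by simp [PySem.Set.add, hm]
        have h1 : pvUniqueA seen (a :: t) = pvUniqueA seen t := by simp [pvUniqueA, hm]
        have hupd : PySem.Set.update seen (a :: t) = PySem.Set.update seen t := by
          simp [PySem.Set.update, hadd]
        rw [h1, hupd, ih]
      · have hm : a ∉ seen := by
          simp only [PySem.Set.contains] at h
          exact fun hmem => h (List.elem_eq_true_of_mem hmem)
        have hadd : PySem.Set.add seen a = seen ++ [a] := by simp [PySem.Set.add, hm]
        have h1 : pvUniqueA seen (a :: t) = a :: pvUniqueA (seen ++ [a]) t := by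
          simp only [pvUniqueA, h, if_false, Bool.false_eq_true]
          rw [hadd]
        have hupd : PySem.Set.update seen (a :: t) = PySem.Set.update (seen ++ [a]) t := by
          simp only [PySem.Set.update, List.foldl_cons, hadd]
        rw [h1, hupd, ← ih (seen ++ [a])]
        simp

lemma pvUniqueA_ofList (xs : List String) :
    pvUniqueA PySem.Set.empty xs = PySem.Set.ofList xs := by
  have h := pvUniqueA_update xs PySem.Set.empty
  rw [PySem.Set.ofList_eq_foldl]
  simpa [PySem.Set.empty, PySem.Set.update] using h

-- A's per-channel list is exactly the authors of that channel, in order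
lemma pvA_getD (messages : List (String × String)) (c : String) :
    ((messages.foldl (fun d p => d.modify p.1 [] (· ++ [p.2])) PySem.Dict.empty).getD c [])
      = (messages.filter (fun p => p.1 == c)).map (fun p => p.2) := by
  simpa using PySem.Dict.getD_foldl_modify_append messages PySem.Dict.empty c

-- deduping after mapping = mapping after deduping, as first-occurrence sets are determined by first occurrences
lemma pvOfListMap {α β : Type} [BEq α] [LawfulBEq α] [BEq β] [LawfulBEq β]
    (l : List α) (f : α → β) :
    PySem.Set.ofList ((PySem.Set.ofList l).map f) = PySem.Set.ofList (l.map f) := by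
  induction l using List.reverseRecOn with
  | nil => rfl
  | append_singleton xs x ih =>
      have hR : PySem.Set.ofList ((xs ++ [x]).map f)
          = PySem.Set.add (PySem.Set.ofList (xs.map f)) (f x) := by
        rw [List.map_append, List.map_singleton, PySem.Set.ofList_append_singleton]
      rw [PySem.Set.ofList_append_singleton, hR]
      by_cases h : x ∈ PySem.Set.ofList xs
      · have hadd : PySem.Set.add (PySem.Set.ofList xs) x = PySem.Set.ofList xs := by
          simp [PySem.Set.add, h]
        have hfx : f x ∈ PySem.Set.ofList (xs.map f) := by
          rw [PySem.Set.mem_ofList] at h ⊢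
          exact List.mem_map_of_mem h
        rw [hadd, ih]
        simp [PySem.Set.add, hfx]
      · have hadd : PySem.Set.add (PySem.Set.ofList xs) x = PySem.Set.ofList xs ++ [x] := by
          simp [PySem.Set.add, h]
        rw [hadd, List.map_append, List.map_singleton, PySem.Set.ofList_append_singleton, ih]

-- deduping authors within a channel = filtering the globally deduped pair list to that channel
lemma pvDedupFilter (l : List (String × String)) (c : String) :
    PySem.Set.ofList ((l.filter (fun p => p.1 == c)).map (fun p => p.2))
      = ((PySem.Set.ofList l).filter (fun p => p.1 == c)).map (fun p => p.2) := by
  induction l using List.reverseRecOn with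
  | nil => rfl
  | append_singleton xs x ih =>
      rw [PySem.Set.ofList_append_singleton, List.filter_append]
      by_cases hP : x.1 = c
      · have hPb : (x.1 == c) = true := by simp [hP]
        have hx : x = (c, x.2) := by
          cases x with | mk a b => simp at hP ⊢; exact hP
        by_cases h : x ∈ PySem.Set.ofList xs
        · have hadd : PySem.Set.add (PySem.Set.ofList xs) x = PySem.Set.ofList xs := by
            simp [PySem.Set.add, h]
          have hx2 : x.2 ∈ ((PySem.Set.ofList xs).filter (fun p => p.1 == c)).map
              (fun p => p.2) := by
            refine List.mem_map_of_mem (List.mem_filter.mpr ⟨h, hPb⟩)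
          rw [hadd, ← ih]
          simp only [List.filter_cons, hPb, if_pos, List.filter_nil, List.map_append,
            List.map_cons, List.map_nil, PySem.Set.ofList_append_singleton]
          rw [ih]
          simp [PySem.Set.add, hx2]
        · have hadd : PySem.Set.add (PySem.Set.ofList xs) x = PySem.Set.ofList xs ++ [x] := by
            simp [PySem.Set.add, h]
          have hx2 : x.2 ∉ ((PySem.Set.ofList xs).filter (fun p => p.1 == c)).map
              (fun p => p.2) := by
            intro hmem
            rcases List.mem_map.mp hmem with ⟨p, hp, hp2⟩
            rcases List.mem_filter.mp hp with ⟨hps, hpc⟩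
            have hpc' : p.1 = c := by simpa using hpc
            have : p = x := by
              cases p with | mk a b =>
                simp only at hpc' hp2
                rw [hx]; simp [hpc', hp2]
            exact h (this ▸ hps)
          rw [hadd, List.filter_append]
          simp only [List.filter_cons, hPb, if_pos, List.filter_nil, List.map_append,
            List.map_cons, List.map_nil, PySem.Set.ofList_append_singleton]
          rw [ih]
          simp [PySem.Set.add, hx2]
      · have hPb : (x.1 == c) = false := by simp [hP]
        by_cases h : x ∈ PySem.Set.ofList xs
        · have hadd : PySem.Set.add (PySem.Set.ofList xs) x = PySem.Set.ofList xs := by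
            simp [PySem.Set.add, h]
          rw [hadd]
          simp [hPb, ih]
        · have hadd : PySem.Set.add (PySem.Set.ofList xs) x = PySem.Set.ofList xs ++ [x] := by
            simp [PySem.Set.add, h]
          rw [hadd, List.filter_append]
          simp [hPb, ih]

-- distinct keys covering every element: the per-key filtered lengths sum to the total length
lemma pvSumLen (ks : List String) (l : List (String × String)) (hnd : ks.Nodup)
    (hcov : ∀ p ∈ l, p.1 ∈ ks) :
    (ks.map (fun c => ((l.filter (fun p => p.1 == c)).length : Int))).sum = (l.length : Int) := by
  induction ks generalizing l with
  | nil =>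
      cases l with
      | nil => simp
      | cons p t => exact absurd (hcov p (by simp)) (by simp)
  | cons c ks ih =>
      have hnd' : ks.Nodup := hnd.of_cons
      have hc : c ∉ ks := by simpa using (List.nodup_cons.mp hnd).1
      set l2 := l.filter (fun p => !(p.1 == c)) with hl2
      have hmapeq : ∀ c' ∈ ks,
          ((l.filter (fun p => p.1 == c')).length : Int)
            = ((l2.filter (fun p => p.1 == c')).length : Int) := by
        intro c' hc'
        have hcc : c' ≠ c := fun h => hc (h ▸ hc')
        congr 1
        rw [hl2, List.filter_filter]
        refine congrArg _ (List.filter_congr ?_)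
        intro p _
        by_cases h : p.1 = c'
        · simp [h, hcc]
        · simp [h]
      have hrest : (ks.map (fun c' => ((l.filter (fun p => p.1 == c')).length : Int))).sum
          = (l2.length : Int) := by
        rw [List.map_congr_left hmapeq]
        exact ih l2 hnd' (by
          intro p hp
          have hpl : p ∈ l := List.mem_of_mem_filter hp
          have hne : ¬ p.1 = c := by
            have := List.of_mem_filter hp
            simpa using this
          have := hcov p hpl
          simpa [hne] using this)
      simp only [List.map_cons, List.sum_cons, hrest]
      have hsplit := List.length_eq_length_filter_add (l := l) (fun p => p.1 == c)
      rw [hl2]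
      omega

-- ===== VERDICT (by name: the statement is the Claim_ definition above) =====
theorem format_notification_spec : Claim_equal_format_notification := by
  intro messages _
  unfold Spec_format_notification format_notification format_notification_alt
  by_cases hnil : messages = []
  · simp [hnil]
  · simp only [hnil, if_neg, not_false_eq_true, PySem.List.dedup_eq_ofList]
    set dA := messages.foldl (fun d p => d.modify p.1 [] (· ++ [p.2])) PySem.Dict.empty with hdA
    have hkeysA : dA.keys = PySem.Set.ofList (messages.map (fun p => p.1)) := by
      rw [hdA]
      have := PySem.Dict.keys_foldl_modify_key (l := messages) (key := fun p : String × String => p.1)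
        (d0 := ([] : List String)) (f := fun _ p (v : List String) => v ++ [p.2]) (d := PySem.Dict.empty)
      simpa [PySem.Dict.keys, PySem.Dict.empty, PySem.Set.update, PySem.Set.ofList_eq_foldl] using this
    -- B's channel list is the same as A's key list
    have hchan : PySem.Set.ofList ((PySem.Set.ofList messages).map (fun p => p.1))
        = dA.keys := by
      rw [hkeysA, pvOfListMap]
    -- totals agree
    have hnodA : dA.keys.Nodup := by
      rw [hkeysA]; exact PySem.Set.nodup_ofList _
    have htot : (dA.values.map (fun v => (v.length : Int))).sum = (messages.length : Int) := by
      rw [PySem.Dict.values_eq_map_keys dA hnodA ([] : List String), List.map_map, hkeysA]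
      calc ((PySem.Set.ofList (messages.map (fun p => p.1))).map
              ((fun v : List String => (v.length : Int)) ∘ fun k => dA.getD k [])).sum
          = ((PySem.Set.ofList (messages.map (fun p => p.1))).map
              (fun c => ((messages.filter (fun p => p.1 == c)).length : Int))).sum := by
            refine congrArg _ (List.map_congr_left ?_)
            intro c _
            simp [Function.comp, hdA, pvA_getD]
        _ = (messages.length : Int) := by
            refine pvSumLen _ _ (PySem.Set.nodup_ofList _) ?_
            intro p hp
            rw [PySem.Set.mem_ofList]
            exact List.mem_map_of_mem hp
    rw [htot, ← hchan,
      PySem.List.foldl_append_singleton_eq_map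
        (l := PySem.List.sorted (PySem.Set.ofList ((PySem.Set.ofList messages).map (fun p => p.1)))
                (fun x => x) false)
        (f := fun channel => "#" ++ channel ++ "(" ++
          PySem.Str.join "," ((pvUniqueA PySem.Set.empty (dA.getD channel [])).map
            (fun a => "@" ++ a)) ++ ")") (acc := [])]
    rw [List.nil_append]
    refine congrArg _ (congrArg _ (List.map_congr_left ?_))
    intro c _
    rw [hdA, pvA_getD, pvUniqueA_ofList, pvDedupFilter, List.map_map]
    rfl
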